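-- pv_equiv track=rewrite | github.com/cowienduckie/dsa-practice-python | leetcode/problems/2094_finding-3-digit-even-numbers.py | findEvenNumbers
-- ===== SOURCE A (Python) =====
-- from collections import Counter
-- from typing import List
--
-- def findEvenNumbers(digits: List[int]) -> List[int]:
--     # Track frequency of each digit
--     freq = Counter(digits)
--
--     # Use DFS and backtracking to compute all valid combinations from digits
--     conf = {
--         1: {"digits": range(1, 10), "multiplier": 100},
--         2: {"digits": range(10), "multiplier": 10},
--         3: {"digits": range(0, 10, 2), "multiplier": 1},
--     }
--     ans = []
--
--     def dfs(pos: int, num: int) -> None: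
--         if pos < 4:
--             for d in conf[pos]["digits"]:
--                 if freq[d] != 0:
--                     freq[d] -= 1
--                     dfs(pos + 1, num + d * conf[pos]["multiplier"])
--                     freq[d] += 1
--         else:
--             ans.append(num)
--
--     # Start the DFS from 0 and first digit
--     dfs(1, 0)
--     return ans
-- ===== SOURCE B (Python) =====
-- from collections import Counter
--
-- def findEvenNumbers(digits):
--     freq = Counter(digits)
--     ans = []
--     for n in range(100, 1000, 2):
--         need = Counter((n // 100, n // 10 % 10, n % 10))
--         if all(freq[d] >= k for d, k in need.items()):
--             ans.append(n)
--     return ans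
-- ===== Notes on version B (the rewrite author's own statement) =====
-- stated objective: simpler
-- what changed: Replaces the DFS/backtracking over a mutated-and-restored Counter by a single generate-and-test scan of the 450 even candidates 100..998, keeping each candidate whose three digits fit into Counter(digits).
import Mathlib
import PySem

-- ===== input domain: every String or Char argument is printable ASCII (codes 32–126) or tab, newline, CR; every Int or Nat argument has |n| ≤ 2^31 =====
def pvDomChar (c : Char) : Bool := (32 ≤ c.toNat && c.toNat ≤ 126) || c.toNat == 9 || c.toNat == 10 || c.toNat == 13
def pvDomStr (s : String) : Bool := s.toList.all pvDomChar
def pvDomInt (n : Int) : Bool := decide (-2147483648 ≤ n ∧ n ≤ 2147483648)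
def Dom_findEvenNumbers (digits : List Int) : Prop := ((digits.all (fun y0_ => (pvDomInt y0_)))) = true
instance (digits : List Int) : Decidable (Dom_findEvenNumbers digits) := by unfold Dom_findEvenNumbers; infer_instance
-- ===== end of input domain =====

-- B replaces A's DFS/backtracking over a mutable Counter by a generate-and-test scan of the
-- 450 even candidates 100..998, keeping each one whose digit multiset fits Counter(digits)
-- (objective: simpler).

-- ===== PORT A =====
-- DFS with backtracking: the mutated-then-restored Counter is modelled functionally by
-- passing the decremented dict into the inner loop (the original dict is reused afterwards,
-- exactly the restore `freq[d] += 1`).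
def findEvenNumbers (digits : List Int) : List Int :=
  let freq := PySem.Dict.counter digits
  (PySem.List.pyRange 1 10 1).foldl (fun ans d1 =>
    if freq.getD d1 0 ≠ 0 then
      let freq1 := freq.insert d1 (freq.getD d1 0 - 1)
      (PySem.List.pyRange 0 10 1).foldl (fun ans d2 =>
        if freq1.getD d2 0 ≠ 0 then
          let freq2 := freq1.insert d2 (freq1.getD d2 0 - 1)
          (PySem.List.pyRange 0 10 2).foldl (fun ans d3 =>
            if freq2.getD d3 0 ≠ 0 then
              ans ++ [0 + d1 * 100 + d2 * 10 + d3 * 1]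
            else ans) ans
        else ans) ans
    else ans) []

-- ===== PORT B =====
def findEvenNumbers_alt (digits : List Int) : List Int :=
  let freq := PySem.Dict.counter digits
  (PySem.List.pyRange 100 1000 2).foldl (fun ans n =>
    let need := PySem.Dict.counter
      [PySem.Int.floordiv n 100, PySem.Int.mod (PySem.Int.floordiv n 10) 10, PySem.Int.mod n 10]
    if need.items.all (fun dk => decide (freq.getD dk.1 0 ≥ dk.2)) then ans ++ [n] else ans) []

-- ===== PRECONDITION & SPEC =====
def Spec_findEvenNumbers (digits : List Int) (out : List Int) : Prop := out = findEvenNumbers_alt digits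
instance (digits : List Int) (out : List Int) : Decidable (Spec_findEvenNumbers digits out) := by unfold Spec_findEvenNumbers; infer_instance

-- ===== CLAIM (what is proved, stated in full; the proofs are below) =====
def Claim_equal_findEvenNumbers : Prop := ∀ (digits : List Int), Dom_findEvenNumbers digits → Spec_findEvenNumbers digits (findEvenNumbers digits)

-- ===== LEMMAS AND PROOFS =====

-- the digit-count function both programs consult
def pvCnt (digits : List Int) : Int → Int := fun d => (digits.count d : Int)

-- "the three digits of the candidate fit into the available counts"
def pvFits (c : Int → Int) (d1 d2 d3 : Int) : Bool :=
  ([d1, d2, d3] : List Int).all fun d => decide ((([d1, d2, d3] : List Int).count d : Int) ≤ c d)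

-- common normal form of both programs
def pvMid (c : Int → Int) : List Int :=
  (PySem.List.pyRange 1 10 1).flatMap fun d1 =>
    (PySem.List.pyRange 0 10 1).flatMap fun d2 =>
      ((PySem.List.pyRange 0 10 2).filter fun d3 => pvFits c d1 d2 d3).map
        fun d3 => 0 + d1 * 100 + d2 * 10 + d3 * 1

lemma pvIteAppend (p : Prop) [Decidable p] (ans l : List Int) :
    (if p then ans ++ l else ans) = ans ++ (if p then l else []) := by
  split <;> simp

-- A's nested DFS condition, in terms of the count function, IS the multiset-fit test
lemma pvCondIff (c : Int → Int) (hc : ∀ d, 0 ≤ c d) (d1 d2 d3 : Int) :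
    pvFits c d1 d2 d3 = true ↔
      (c d1 ≠ 0 ∧ (if d2 = d1 then c d1 - 1 else c d2) ≠ 0 ∧
        (if d3 = d2 then (if d2 = d1 then c d1 - 1 else c d2) - 1
         else if d3 = d1 then c d1 - 1 else c d3) ≠ 0) := by
  have h1 := hc d1; have h2 := hc d2; have h3 := hc d3
  simp only [pvFits, List.all_eq_true, decide_eq_true_eq, List.mem_cons, List.not_mem_nil,
    or_false, forall_eq_or_imp, forall_eq, List.count_cons, List.count_nil, beq_iff_eq]
  by_cases e21 : d2 = d1
  · subst e21
    by_cases e32 : d3 = d2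
    · subst e32
      push_cast
      omega
    · simp only [if_neg e32, if_neg (Ne.symm e32)]
      push_cast
      omega
  · by_cases e31 : d3 = d1
    · subst e31
      simp only [if_neg e21, if_neg (Ne.symm e21)]
      push_cast
      omega
    · by_cases e32 : d3 = d2
      · subst e32
        simp only [if_neg e21, if_neg (Ne.symm e21)]
        push_cast
        omega
      · simp only [if_neg e21, if_neg (Ne.symm e21), if_neg e31, if_neg (Ne.symm e31),
          if_neg e32, if_neg (Ne.symm e32)]
        push_cast
        omega

-- the candidate space splits into the three digit ranges
set_option maxRecDepth 40000 in
lemma pvRangeSplit :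
    PySem.List.pyRange 100 1000 2 =
      (PySem.List.pyRange 1 10 1).flatMap (fun d1 =>
        (PySem.List.pyRange 0 10 1).flatMap (fun d2 =>
          (PySem.List.pyRange 0 10 2).map (fun d3 => 0 + d1 * 100 + d2 * 10 + d3 * 1))) := by
  decide

lemma pvFlatMapIte {a b : Type} (l : List a) (p : a → Prop) [DecidablePred p] (f : a → b) :
    (l.flatMap fun x => if p x then [f x] else []) =
      (l.filter fun x => decide (p x)).map f := by
  induction l with
  | nil => rfl
  | cons x t ih => by_cases hx : p x <;> simp [hx, ih]

-- collapsing A's pruned nested loops into the single fit-filter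
lemma pvNested (c : Int → Int) (hc : ∀ d, 0 ≤ c d) :
    ((PySem.List.pyRange 1 10 1).flatMap fun d1 =>
      if c d1 ≠ 0 then
        (PySem.List.pyRange 0 10 1).flatMap fun d2 =>
          if (if d2 = d1 then c d1 - 1 else c d2) ≠ 0 then
            (PySem.List.pyRange 0 10 2).flatMap fun d3 =>
              if (if d3 = d2 then (if d2 = d1 then c d1 - 1 else c d2) - 1
                  else if d3 = d1 then c d1 - 1 else c d3) ≠ 0 then
                [0 + d1 * 100 + d2 * 10 + d3 * 1]
              else []
          else []
      else [])
    = pvMid c := by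
  unfold pvMid
  simp only [pvFlatMapIte]
  apply List.flatMap_congr
  intro d1 _
  by_cases hp1 : c d1 ≠ 0
  · rw [if_pos hp1]
    apply List.flatMap_congr
    intro d2 _
    by_cases hp2 : (if d2 = d1 then c d1 - 1 else c d2) ≠ 0
    · rw [if_pos hp2]
      congr 1
      apply List.filter_congr
      intro d3 _
      rw [Bool.eq_iff_iff, decide_eq_true_eq, pvCondIff c hc]
      tauto
    · rw [if_neg hp2]
      symm
      simp only [List.map_eq_nil_iff, List.filter_eq_nil_iff]
      intro d3 _
      rw [pvCondIff c hc]
      tauto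
  · rw [if_neg hp1]
    symm
    rw [List.flatMap_eq_nil_iff]
    intro d2 _
    simp only [List.map_eq_nil_iff, List.filter_eq_nil_iff]
    intro d3 _
    rw [pvCondIff c hc]
    tauto

lemma pvA_eq (digits : List Int) : findEvenNumbers digits = pvMid (pvCnt digits) := by
  unfold findEvenNumbers
  simp only [PySem.Dict.getD_counter, PySem.Dict.getD_insert,
    pvIteAppend, PySem.List.foldl_append_eq_flatMap, List.nil_append]
  exact pvNested (pvCnt digits) (fun d => by simp [pvCnt])

-- the three digit expressions of a candidate recover its digits
lemma pvDigitsOf (d1 d2 d3 : Int) (h2 : 0 ≤ d2) (h2' : d2 < 10)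
    (h3 : 0 ≤ d3) (h3' : d3 < 10) :
    ([PySem.Int.floordiv (0 + d1 * 100 + d2 * 10 + d3 * 1) 100,
      PySem.Int.mod (PySem.Int.floordiv (0 + d1 * 100 + d2 * 10 + d3 * 1) 10) 10,
      PySem.Int.mod (0 + d1 * 100 + d2 * 10 + d3 * 1) 10] : List Int) = [d1, d2, d3] := by
  rw [PySem.Int.floordiv_eq_ediv_of_pos (by norm_num), PySem.Int.floordiv_eq_ediv_of_pos (by norm_num),
    PySem.Int.mod_eq_emod_of_pos (by norm_num), PySem.Int.mod_eq_emod_of_pos (by norm_num)]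
  simp only [List.cons.injEq, and_true]
  refine ⟨?_, ?_, ?_⟩ <;> omega

lemma pvB_eq (digits : List Int) : findEvenNumbers_alt digits = pvMid (pvCnt digits) := by
  unfold findEvenNumbers_alt
  simp only [PySem.List.foldl_append_if_eq_filter, List.nil_append]
  rw [pvRangeSplit]
  simp only [List.filter_flatMap, List.filter_map]
  unfold pvMid
  apply List.flatMap_congr
  intro d1 _
  apply List.flatMap_congr
  intro d2 hd2
  congr 1
  apply List.filter_congr
  intro d3 hd3
  obtain ⟨h2, h2'⟩ := PySem.List.mem_pyRange_one.mp hd2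
  obtain ⟨h3, h3', -⟩ := (PySem.List.mem_pyRange_iff_of_pos (by norm_num) d3).mp hd3
  simp only [Function.comp]
  rw [pvDigitsOf d1 d2 d3 h2 h2' h3 h3']
  rw [Bool.eq_iff_iff]
  simp only [pvFits, List.all_eq_true, decide_eq_true_eq, PySem.Dict.items_counter,
    List.forall_mem_map, PySem.Set.mem_ofList, PySem.Dict.getD_counter, ge_iff_le, pvCnt]

-- ===== VERDICT (by name: the statement is the Claim_ definition above) =====
theorem findEvenNumbers_spec : Claim_equal_findEvenNumbers := by
  intro digits _
  unfold Spec_findEvenNumbers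
  rw [pvA_eq, pvB_eq]
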